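-- pv_equiv track=rewrite | github.com/leorehm/ping-analysis | ping-analysis.py | extract_pings
-- ===== SOURCE A (Python) =====
-- from itertools import dropwhile
--
-- def extract_pings(pings: list[str]) -> list[str]:
--     # remove head until "Reply from" is matched
--     pings = list(dropwhile(lambda ln: "Reply from" not in ln, pings))
--     # TODO: make readable
--     # remove tail until "Reply from" is matched
--     n = len(pings)
--     i = n - 1
--     while "Reply from" not in pings[i]:
--         pings.pop(i)
--         i -=  1
--     lines_to_delete = len(pings) - 1 - i
--     pings[-lines_to_delete:lines_to_delete and None] = []
--     return pings
-- ===== SOURCE B (Python) =====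
-- def extract_pings(pings: list[str]) -> list[str]:
--     # scan up for the first line containing "Reply from"
--     first = 0
--     while "Reply from" not in pings[first]:
--         first += 1
--     # scan down for the last line containing "Reply from"
--     last = len(pings) - 1
--     while "Reply from" not in pings[last]:
--         last -= 1
--     return pings[first:last + 1]
-- ===== Notes on version B (the rewrite author's own statement) =====
-- stated objective: simpler
-- what changed: Replaces dropwhile plus an in-place tail pop loop and a slice-deletion no-op by two plain index scans (first match from the front, last match from the back) and a single slice.
import Mathlib
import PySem

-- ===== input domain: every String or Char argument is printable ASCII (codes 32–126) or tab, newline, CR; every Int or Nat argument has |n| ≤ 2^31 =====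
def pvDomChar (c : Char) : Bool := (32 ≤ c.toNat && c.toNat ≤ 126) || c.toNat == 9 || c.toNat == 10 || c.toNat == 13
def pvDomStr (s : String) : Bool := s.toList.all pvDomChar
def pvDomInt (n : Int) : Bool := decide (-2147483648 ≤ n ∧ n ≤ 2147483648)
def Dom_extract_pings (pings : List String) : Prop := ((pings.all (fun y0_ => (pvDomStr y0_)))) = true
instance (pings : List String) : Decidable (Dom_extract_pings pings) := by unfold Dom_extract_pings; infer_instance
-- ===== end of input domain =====

-- B replaces A's dropwhile + in-place tail popping + slice deletion by two index scans and
-- one slice (objective: simpler). Return-value equivalence only; neither version mutates the caller's list.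

-- "Reply from" in ln
def pvHasRF (ln : String) : Bool := PySem.Str.isIn "Reply from" ln

-- ===== PORT A =====
-- the while loop `while "Reply from" not in pings[i]: pings.pop(i); i -= 1` always pops the
-- LAST element, so it is transcribed as a right-to-left recursion over the reversed list;
-- [] = the state where Python's pings[i] raises IndexError (excluded by Pre_)
def pvPopLoop : List String → List String
  | [] => []
  | x :: rest => if pvHasRF x then x :: rest else pvPopLoop rest

def extract_pings (pings : List String) : List String :=
  -- pings = list(dropwhile(lambda ln: "Reply from" not in ln, pings))
  let d := pings.dropWhile (fun ln => !pvHasRF ln)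
  -- the while loop (see pvPopLoop); afterwards i = len(pings) - 1
  let r := (pvPopLoop d.reverse).reverse
  let i : Int := (r.length : Int) - 1
  let ltd : Int := (r.length : Int) - 1 - i
  -- pings[-ltd : ltd and None] = [] : for ltd = 0 this deletes pings[0:0] (no-op);
  -- for ltd > 0 it would delete the tail, keeping pings[:-ltd]
  if ltd = 0 then r else PySem.List.slice r none (some (-ltd))

-- ===== PORT B =====
-- an upward index scan `while "Reply from" not in pings[first]: first += 1`, returning the
-- index reached; none = the scan runs off the list and Python raises IndexError (excluded by Pre_)
def pvScanIdx : List String → Option Nat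
  | [] => none
  | x :: rest => if pvHasRF x then some 0 else (pvScanIdx rest).map (· + 1)

def extract_pings_alt (pings : List String) : List String :=
  match pvScanIdx pings, pvScanIdx pings.reverse with
  | some f, some g =>
      -- the downward scan from len-1 is the upward scan over the reversed list
      let last : Int := (pings.length : Int) - 1 - (g : Int)
      PySem.List.slice pings (some (f : Int)) (some (last + 1))
  | _, _ => []  -- unreachable under Pre_ (Python raises IndexError)

-- ===== PRECONDITION & SPEC =====
-- Pre_: some line contains "Reply from"; otherwise both A and B raise IndexError.
def Pre_extract_pings (pings : List String) : Prop := pings.any pvHasRF = true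
instance (pings : List String) : Decidable (Pre_extract_pings pings) := by unfold Pre_extract_pings; infer_instance
def pvWitness_extract_pings : List String := ["noise", "Reply from 1.2.3.4: ok", "noise"]

def Spec_extract_pings (pings : List String) (out : List String) : Prop := out = extract_pings_alt pings
instance (pings : List String) (out : List String) : Decidable (Spec_extract_pings pings out) := by unfold Spec_extract_pings; infer_instance

-- ===== CLAIM (what is proved, stated in full; the proofs are below) =====
def Claim_equal_extract_pings : Prop := ∀ (pings : List String), Dom_extract_pings pings → Pre_extract_pings pings → Spec_extract_pings pings (extract_pings pings)

-- ===== LEMMAS AND PROOFS =====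

-- pvScanIdx finds an index iff some line matches
theorem pvScanIdx_of_any (l : List String) (h : l.any pvHasRF = true) :
    ∃ f, pvScanIdx l = some f := by
  induction l with
  | nil => simp at h
  | cons x rest ih =>
    cases hx : pvHasRF x with
    | true => exact ⟨0, by simp [pvScanIdx, hx]⟩
    | false =>
      rw [List.any_cons, hx, Bool.false_or] at h
      obtain ⟨f, hf⟩ := ih h
      exact ⟨f + 1, by simp [pvScanIdx, hx, hf]⟩

-- what pvScanIdx = some f says: the f-th line is the first match
theorem pvScanIdx_spec (l : List String) (f : Nat) (h : pvScanIdx l = some f) :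
    ∃ a t, l.drop f = a :: t ∧ pvHasRF a = true ∧
      l.dropWhile (fun ln => !pvHasRF ln) = a :: t := by
  induction l generalizing f with
  | nil => simp [pvScanIdx] at h
  | cons x rest ih =>
    cases hx : pvHasRF x with
    | true =>
      simp [pvScanIdx, hx] at h
      subst h
      exact ⟨x, rest, rfl, hx, by simp [hx]⟩
    | false =>
      simp [pvScanIdx, hx] at h
      obtain ⟨f', hf', rfl⟩ := h
      obtain ⟨a, t, h1, h2, h3⟩ := ih f' hf'
      exact ⟨a, t, by simpa using h1, h2, by simp [hx, h3]⟩

-- A's pop loop is dropWhile of the non-matching prefix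
theorem pvPopLoop_eq_dropWhile (l : List String) :
    pvPopLoop l = l.dropWhile (fun ln => !pvHasRF ln) := by
  induction l with
  | nil => rfl
  | cons x rest ih =>
    cases hx : pvHasRF x <;> simp [pvPopLoop, hx, ih]

-- a scan that succeeds on a prefix ignores what follows
theorem pvScanIdx_append (l₁ l₂ : List String) (g : Nat) (h : pvScanIdx l₁ = some g) :
    pvScanIdx (l₁ ++ l₂) = some g := by
  induction l₁ generalizing g with
  | nil => simp [pvScanIdx] at h
  | cons x rest ih =>
    cases hx : pvHasRF x with
    | true => simp [pvScanIdx, hx] at h ⊢; omega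
    | false =>
      simp [pvScanIdx, hx] at h ⊢
      obtain ⟨g', hg', rfl⟩ := h
      exact ⟨g', ih g' hg', rfl⟩

theorem pvScanIdx_lt_length (l : List String) (f : Nat) (h : pvScanIdx l = some f) :
    f < l.length := by
  obtain ⟨a, t, h1, -, -⟩ := pvScanIdx_spec l f h
  by_contra hge
  rw [List.drop_eq_nil_of_le (by omega)] at h1
  simp at h1

-- ===== VERDICT (by name: the statement is the Claim_ definition above) =====
theorem extract_pings_spec : Claim_equal_extract_pings := by
  intro pings _ hpre
  unfold Spec_extract_pings
  have hpre' : pings.any pvHasRF = true := hpre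
  obtain ⟨f, hf⟩ := pvScanIdx_of_any pings hpre'
  obtain ⟨a, t, hdrop, ha, hdw⟩ := pvScanIdx_spec pings f hf
  have hflt : f < pings.length := pvScanIdx_lt_length pings f hf
  have hdany : (pings.drop f).reverse.any pvHasRF = true := by
    rw [List.any_eq_true]
    exact ⟨a, by simp [hdrop], ha⟩
  obtain ⟨g, hg⟩ := pvScanIdx_of_any (pings.drop f).reverse hdany
  obtain ⟨b, t', hgdrop, -, hgdw⟩ := pvScanIdx_spec (pings.drop f).reverse g hg
  have hglt : g < (pings.drop f).length := by
    have := pvScanIdx_lt_length (pings.drop f).reverse g hg; simpa using this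
  have hgfull : pvScanIdx pings.reverse = some g := by
    rw [show pings.reverse = (pings.drop f).reverse ++ (pings.take f).reverse by
      rw [← List.reverse_append, List.take_append_drop]]
    exact pvScanIdx_append _ _ g hg
  have hA : extract_pings pings
      = List.take ((pings.drop f).length - g) (pings.drop f) := by
    simp only [extract_pings]
    rw [hdw, ← hdrop, pvPopLoop_eq_dropWhile, hgdw, ← hgdrop, List.reverse_drop,
      List.reverse_reverse, List.length_reverse]
    split_ifs with h0
    · rfl
    · exact absurd (by ring) h0
  have hbound : (pings.length : Int) - 1 - (g : Int) + 1 = ((pings.length - g : Nat) : Int) := by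
    push_cast [Nat.cast_sub (by simp at hglt; omega : g ≤ pings.length)]; ring
  have hB : extract_pings_alt pings
      = List.take (pings.length - g - f) (pings.drop f) := by
    simp only [extract_pings_alt]
    rw [hf, hgfull]
    simp only [hbound, PySem.List.slice_natCast]
  rw [hA, hB]
  congr 1
  rw [List.length_drop]
  omega
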